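-- pv_equiv track=rewrite | github.com/thanhdathuynh/DGIT | gene_mapping.py | map_to_symbol
-- ===== SOURCE A (Python) =====
-- GENE_MAPPING = {
--     "SLC6A4": ["Solute Carrier Family 6 Member 4", "SERT"],
--     "BDNF": ["Brain-Derived Neurotrophic Factor"],
--     "HTR2A": ["5-Hydroxytryptamine Receptor 2A", "Serotonin Receptor 2A"],
--     "COMT": ["Catechol-O-Methyltransferase"],
--     "TPH2": ["Tryptophan Hydroxylase 2"]
-- }
--
-- def map_to_symbol(query):
--     """Return the gene symbol for a given alias or symbol."""
--     query_lower = query.lower().strip()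
--     for symbol, aliases in GENE_MAPPING.items():
--         if query_lower == symbol.lower():
--             return symbol
--         if query_lower in [a.lower() for a in aliases]:
--             return symbol
--     return None
-- ===== SOURCE B (Python) =====
-- GENE_MAPPING = {
--     "SLC6A4": ["Solute Carrier Family 6 Member 4", "SERT"],
--     "BDNF": ["Brain-Derived Neurotrophic Factor"],
--     "HTR2A": ["5-Hydroxytryptamine Receptor 2A", "Serotonin Receptor 2A"],
--     "COMT": ["Catechol-O-Methyltransferase"],
--     "TPH2": ["Tryptophan Hydroxylase 2"]
-- }
--
-- # A flat (lowercased name, symbol) table sorted once by name; each query is then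
-- # resolved by hand-written binary search instead of a linear scan of the mapping.
-- # Correct because every lowercased symbol/alias in GENE_MAPPING is distinct.
-- _INDEX = sorted(
--     ((name.lower(), symbol)
--      for symbol, aliases in GENE_MAPPING.items()
--      for name in [symbol] + aliases),
--     key=lambda t: t[0],
-- )
--
-- def map_to_symbol(query):
--     """Return the gene symbol for a given alias or symbol."""
--     q = query.lower().strip()
--     lo, hi = 0, len(_INDEX)
--     while lo < hi:
--         mid = (lo + hi) // 2
--         key, symbol = _INDEX[mid]
--         if key == q:
--             return symbol
--         if key < q:
--             lo = mid + 1
--         else: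
--             hi = mid
--     return None
-- ===== Notes on version B (the rewrite author's own statement) =====
-- stated objective: alternative
-- what changed: Replaced A's per-call linear scan of GENE_MAPPING (rebuilding lowercased alias lists each call) by a flat (lowered name, symbol) table sorted once at module level, queried by a hand-written binary search.
import Mathlib
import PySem

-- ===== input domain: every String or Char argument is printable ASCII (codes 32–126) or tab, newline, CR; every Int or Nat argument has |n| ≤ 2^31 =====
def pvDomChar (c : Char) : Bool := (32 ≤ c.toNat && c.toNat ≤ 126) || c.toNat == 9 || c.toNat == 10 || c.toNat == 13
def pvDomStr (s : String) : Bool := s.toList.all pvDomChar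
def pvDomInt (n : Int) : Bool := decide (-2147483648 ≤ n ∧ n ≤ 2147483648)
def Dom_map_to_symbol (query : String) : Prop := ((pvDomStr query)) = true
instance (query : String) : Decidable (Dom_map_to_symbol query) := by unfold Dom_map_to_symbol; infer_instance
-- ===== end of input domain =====

-- B replaces A's per-call linear scan of GENE_MAPPING by a flat (lowered name, symbol)
-- table sorted once, queried by binary search (alternative algorithm, same results).

-- ===== PORT A =====
def GENE_MAPPING : List (String × List String) :=
  [("SLC6A4", ["Solute Carrier Family 6 Member 4", "SERT"]),
   ("BDNF", ["Brain-Derived Neurotrophic Factor"]),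
   ("HTR2A", ["5-Hydroxytryptamine Receptor 2A", "Serotonin Receptor 2A"]),
   ("COMT", ["Catechol-O-Methyltransferase"]),
   ("TPH2", ["Tryptophan Hydroxylase 2"])]
-- A's for-loop with early return, as structural recursion over the items list
def mapLoopA (queryLower : String) : List (String × List String) → Option String
  | [] => none
  | (symbol, aliases) :: rest =>
    if queryLower = PySem.Str.lower symbol then some symbol
    else if queryLower ∈ aliases.map PySem.Str.lower then some symbol
    else mapLoopA queryLower rest

def map_to_symbol (query : String) : Option String :=
  mapLoopA (PySem.Str.strip (PySem.Str.lower query)) GENE_MAPPING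

-- ===== PORT B =====
-- Source B's module-level table: flatten to (lowered name, symbol) pairs, sort by name once
def INDEX : List (String × String) :=
  PySem.List.sorted
    (GENE_MAPPING.flatMap (fun p => (p.1 :: p.2).map (fun name => (PySem.Str.lower name, p.1))))
    (fun t => t.1.toList)   -- Python sorts by the key string: code-point lexicographic = '<' on toList (PYSEM str COMPARISON)

-- Source B's while-loop binary search over INDEX; the fuel argument is only a
-- termination bound (hi - lo shrinks each step, so fuel = list length suffices)
def bsearchB (q : String) : Nat → Nat → Nat → Option String
  | 0, _, _ => none
  | fuel + 1, lo, hi =>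
    if lo < hi then
      match INDEX[(lo + hi) / 2]? with
      | none => none
      | some (key, symbol) =>
        if key = q then some symbol
        else if key.toList < q.toList then bsearchB q fuel ((lo + hi) / 2 + 1) hi
        else bsearchB q fuel lo ((lo + hi) / 2)
    else none

def map_to_symbol_alt (query : String) : Option String :=
  bsearchB (PySem.Str.strip (PySem.Str.lower query)) INDEX.length 0 INDEX.length

-- ===== PRECONDITION & SPEC =====
def Spec_map_to_symbol (query : String) (out : Option String) : Prop := out = map_to_symbol_alt query
instance (query : String) (out : Option String) : Decidable (Spec_map_to_symbol query out) := by unfold Spec_map_to_symbol; infer_instance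

-- ===== CLAIM (what is proved, stated in full; the proofs are below) =====
def Claim_equal_map_to_symbol : Prop := ∀ (query : String), Dom_map_to_symbol query → Spec_map_to_symbol query (map_to_symbol query)

-- ===== LEMMAS AND PROOFS =====

-- if the query key occurs nowhere in the searched segment, binary search misses
theorem bsearchB_none (q : String) :
    ∀ (fuel lo hi : Nat),
      (∀ i, lo ≤ i → i < hi → ∀ k sym, INDEX[i]? = some (k, sym) → k ≠ q) →
      bsearchB q fuel lo hi = none := by
  intro fuel
  induction fuel with
  | zero => intro lo hi _; rfl
  | succ m ih =>
    intro lo hi hmiss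
    show bsearchB q (m + 1) lo hi = none
    rw [bsearchB]
    by_cases h : lo < hi
    · simp only [h, if_true]
      rcases he : INDEX[(lo + hi) / 2]? with _ | ⟨k, sym⟩
      · rfl
      · have hk : k ≠ q := hmiss _ (by omega) (by omega) _ _ he
        simp only [hk, if_false]
        by_cases hlt : k.toList < q.toList
        · simp only [hlt, if_true]
          exact ih ((lo + hi) / 2 + 1) hi (fun i h1 h2 => hmiss i (by omega) h2)
        · simp only [hlt, if_false]
          exact ih lo ((lo + hi) / 2) (fun i h1 h2 => hmiss i h1 (by omega))
    · simp [h]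

set_option maxHeartbeats 2000000 in
theorem loop_eq_bsearch (s : String) :
    mapLoopA s GENE_MAPPING = bsearchB s INDEX.length 0 INDEX.length := by
  by_cases e1 : s = "slc6a4"
  · subst e1; decide
  by_cases e2 : s = "solute carrier family 6 member 4"
  · subst e2; decide
  by_cases e3 : s = "sert"
  · subst e3; decide
  by_cases e4 : s = "bdnf"
  · subst e4; decide
  by_cases e5 : s = "brain-derived neurotrophic factor"
  · subst e5; decide
  by_cases e6 : s = "htr2a"
  · subst e6; decide
  by_cases e7 : s = "5-hydroxytryptamine receptor 2a"
  · subst e7; decide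
  by_cases e8 : s = "serotonin receptor 2a"
  · subst e8; decide
  by_cases e9 : s = "comt"
  · subst e9; decide
  by_cases e10 : s = "catechol-o-methyltransferase"
  · subst e10; decide
  by_cases e11 : s = "tph2"
  · subst e11; decide
  by_cases e12 : s = "tryptophan hydroxylase 2"
  · subst e12; decide
  have h1 : PySem.Str.lower "SLC6A4" = "slc6a4" := by decide
  have h2 : PySem.Str.lower "Solute Carrier Family 6 Member 4" = "solute carrier family 6 member 4" := by decide
  have h3 : PySem.Str.lower "SERT" = "sert" := by decide
  have h4 : PySem.Str.lower "BDNF" = "bdnf" := by decide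
  have h5 : PySem.Str.lower "Brain-Derived Neurotrophic Factor" = "brain-derived neurotrophic factor" := by decide
  have h6 : PySem.Str.lower "HTR2A" = "htr2a" := by decide
  have h7 : PySem.Str.lower "5-Hydroxytryptamine Receptor 2A" = "5-hydroxytryptamine receptor 2a" := by decide
  have h8 : PySem.Str.lower "Serotonin Receptor 2A" = "serotonin receptor 2a" := by decide
  have h9 : PySem.Str.lower "COMT" = "comt" := by decide
  have h10 : PySem.Str.lower "Catechol-O-Methyltransferase" = "catechol-o-methyltransferase" := by decide
  have h11 : PySem.Str.lower "TPH2" = "tph2" := by decide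
  have h12 : PySem.Str.lower "Tryptophan Hydroxylase 2" = "tryptophan hydroxylase 2" := by decide
  have hA : mapLoopA s GENE_MAPPING = none := by
    simp only [GENE_MAPPING, mapLoopA, h1, h2, h3, h4, h5, h6, h7, h8, h9, h10, h11, h12,
      List.map_cons, List.map_nil, List.mem_cons, List.not_mem_nil, or_false]
    simp only [e1, e2, e3, e4, e5, e6, e7, e8, e9, e10, e11, e12, if_false, or_self]
  have hIDX : INDEX =
      [("5-hydroxytryptamine receptor 2a", "HTR2A"), ("bdnf", "BDNF"),
       ("brain-derived neurotrophic factor", "BDNF"), ("catechol-o-methyltransferase", "COMT"),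
       ("comt", "COMT"), ("htr2a", "HTR2A"), ("serotonin receptor 2a", "HTR2A"),
       ("sert", "SLC6A4"), ("slc6a4", "SLC6A4"),
       ("solute carrier family 6 member 4", "SLC6A4"), ("tph2", "TPH2"),
       ("tryptophan hydroxylase 2", "TPH2")] := by decide
  have hB : bsearchB s INDEX.length 0 INDEX.length = none := by
    apply bsearchB_none
    intro i hi0 hilen k sym hk hkq
    rw [hkq] at hk
    rw [hIDX] at hk
    rw [hIDX] at hilen
    simp only [List.length_cons, List.length_nil] at hilen
    interval_cases i <;>
      simp only [List.getElem?_cons_zero, List.getElem?_cons_succ, Option.some.injEq,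
        Prod.mk.injEq] at hk <;>
      first
        | exact e1 hk.1.symm | exact e2 hk.1.symm | exact e3 hk.1.symm | exact e4 hk.1.symm
        | exact e5 hk.1.symm | exact e6 hk.1.symm | exact e7 hk.1.symm | exact e8 hk.1.symm
        | exact e9 hk.1.symm | exact e10 hk.1.symm | exact e11 hk.1.symm | exact e12 hk.1.symm
  rw [hA, hB]

-- ===== VERDICT (by name: the statement is the Claim_ definition above) =====
theorem map_to_symbol_spec : Claim_equal_map_to_symbol := by
  intro query _
  unfold Spec_map_to_symbol map_to_symbol map_to_symbol_alt
  exact loop_eq_bsearch _
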